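-- pv_equiv track=rewrite | github.com/runnerxin/machine-learning | Apriori/apriori.py | create_c1
-- ===== SOURCE A (Python) =====
-- def create_c1(dataset):
--     """
--         Desc:
--             创建候选集，即对 dataSet 进行去重，排序，放入 list 中，然后转换所有的元素为 frozenset
--         Args:
--             dataset     原始数据集
--         Returns:
--             frozenset   格式的 list
--     """
--     c1 = []
--     for line in dataset:
--         for item in line:
--             if [item] not in c1:        # 去重
--                 c1.append([item])
--     c1.sort()                           # 对数组进行 `从小到大` 的排序
--     return list(map(frozenset, c1))    # frozenset 表示冻结的 set 集合，元素无改变；可以把它当字典的 key 来使用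
-- ===== SOURCE B (Python) =====
-- def create_c1(dataset):
--     items = sorted(item for line in dataset for item in line)
--     result = []
--     for item in items:
--         if not result or result[-1] != item:
--             result.append(item)
--     return [frozenset([item]) for item in result]
-- ===== Notes on version B (the rewrite author's own statement) =====
-- stated objective: faster
-- what changed: A dedups by scanning the accumulated candidate list for every item ('[item] not in c1') and sorts at the end; B flattens everything with duplicates, sorts once, and drops duplicates in a single adjacent-comparison pass.
import Mathlib
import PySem

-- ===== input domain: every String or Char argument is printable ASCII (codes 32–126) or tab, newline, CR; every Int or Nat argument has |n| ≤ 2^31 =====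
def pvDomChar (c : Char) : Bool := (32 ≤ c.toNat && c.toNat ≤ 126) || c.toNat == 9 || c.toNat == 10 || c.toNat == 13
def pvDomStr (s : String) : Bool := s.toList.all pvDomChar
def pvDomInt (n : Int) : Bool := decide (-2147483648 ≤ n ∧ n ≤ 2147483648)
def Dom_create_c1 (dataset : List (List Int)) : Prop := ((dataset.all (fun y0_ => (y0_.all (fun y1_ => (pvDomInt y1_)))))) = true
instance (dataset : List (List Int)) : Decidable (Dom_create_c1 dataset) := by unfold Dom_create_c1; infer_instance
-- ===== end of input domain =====

-- B replaces A's quadratic membership-scan dedup by flatten + sort + one adjacent-dedup pass (same return value).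

-- ===== PORT A =====
def create_c1 (dataset : List (List Int)) : List (List Int) :=
  let c1 := dataset.foldl (fun c1 line =>
    line.foldl (fun c1 item => if [item] ∈ c1 then c1 else c1 ++ [[item]]) c1) []
  (PySem.List.sorted c1 (fun x => x) false).map (fun x => PySem.Set.ofList x)

-- ===== PORT B =====
def create_c1_alt (dataset : List (List Int)) : List (List Int) :=
  let items := PySem.List.sorted (dataset.flatMap (fun line => line)) (fun x => x) false
  let result := items.foldl (fun res item =>
    if res = [] ∨ PySem.List.pyGet? res (-1) ≠ some item then res ++ [item] else res) []
  result.map (fun item => PySem.Set.ofList [item])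

-- ===== PRECONDITION & SPEC =====
def Spec_create_c1 (dataset : List (List Int)) (out : List (List Int)) : Prop := out = create_c1_alt dataset
instance (dataset : List (List Int)) (out : List (List Int)) : Decidable (Spec_create_c1 dataset out) := by unfold Spec_create_c1; infer_instance

-- ===== CLAIM (what is proved, stated in full; the proofs are below) =====
def Claim_equal_create_c1 : Prop := ∀ (dataset : List (List Int)), Dom_create_c1 dataset → Spec_create_c1 dataset (create_c1 dataset)

-- ===== LEMMAS AND PROOFS =====

-- xs[-1] is the last element
theorem pyGet_neg_one (res : List Int) : PySem.List.pyGet? res (-1) = res.getLast? := by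
  simp [PySem.List.pyGet?, PySem.List.pyIdx?]
  rcases res with _ | ⟨x, t⟩
  · simp
  · simp [List.getLast?_eq_getElem?]

-- lexicographic order on singleton lists is the element order
theorem singleton_lt (a b : Int) : (([a] : List Int) < [b]) ↔ a < b := by
  simp [List.cons_lt_cons_iff]

theorem lastMem (l : List Int) (a : Int) (h : l.getLast? = some a) : a ∈ l := by
  induction l with
  | nil => simp at h
  | cons x t ih =>
    rcases t with _ | ⟨y, u⟩
    · simp at h; simp [h]
    · rw [List.getLast?_cons_cons] at h
      exact List.mem_cons_of_mem _ (ih h)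

-- A's inner loop over one line, started from a mapped set, is Set.update mapped
theorem innerA (line : List Int) (s : List Int) :
    line.foldl (fun c1 item => if [item] ∈ c1 then c1 else c1 ++ [[item]])
      (s.map (fun a => ([a] : List Int)))
      = (PySem.Set.update s line).map (fun a => ([a] : List Int)) := by
  induction line generalizing s with
  | nil => rfl
  | cons x t ih =>
    have hstep : (if [x] ∈ s.map (fun a => ([a] : List Int)) then s.map (fun a => ([a] : List Int))
        else s.map (fun a => ([a] : List Int)) ++ [[x]])
        = (PySem.Set.add s x).map (fun a => ([a] : List Int)) := by
      by_cases hx : x ∈ s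
      · simp [hx, PySem.Set.add, PySem.Set.contains, List.contains_eq_mem]
      · simp [hx, PySem.Set.add, PySem.Set.contains, List.contains_eq_mem]
    simp only [List.foldl_cons, hstep]
    exact ih (PySem.Set.add s x)

-- A's double loop is Set.update line by line
theorem outerA (ds : List (List Int)) (s : List Int) :
    ds.foldl (fun c1 line =>
        line.foldl (fun c1 item => if [item] ∈ c1 then c1 else c1 ++ [[item]]) c1)
      (s.map (fun a => ([a] : List Int)))
      = (ds.foldl (fun s line => PySem.Set.update s line) s).map (fun a => ([a] : List Int)) := by
  induction ds generalizing s with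
  | nil => rfl
  | cons l t ih =>
    simp only [List.foldl_cons, innerA l s]
    exact ih (PySem.Set.update s l)

-- folding Set.update over the lines is Set.ofList of the flattened data
theorem updates_eq_ofList (ds : List (List Int)) :
    ds.foldl (fun s line => PySem.Set.update s line) []
      = PySem.Set.ofList (ds.flatMap (fun x => x)) := by
  have h1 : ds.flatMap (fun x => x) = ds.flatten := by simp
  have h2 : PySem.Set.ofList (ds.flatten) = (ds.flatten).foldl PySem.Set.add [] := rfl
  rw [h1, h2, List.foldl_flatten]
  rfl

-- everything in a strictly increasing list is ≤ its last element
theorem mem_le_getLast (res : List Int) : res.Pairwise (· < ·) → ∀ l : Int,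
    res.getLast? = some l → ∀ a ∈ res, a ≤ l := by
  induction res with
  | nil => intro _ l hl; simp at hl
  | cons x t ih =>
    intro hp l hl a ha
    rcases t with _ | ⟨y, u⟩
    · simp at hl ha; omega
    · rw [List.getLast?_cons_cons] at hl
      rcases List.mem_cons.mp ha with rfl | ha
      · have hlm : l ∈ y :: u := lastMem _ _ hl
        have := (List.pairwise_cons.mp hp).1 l hlm
        omega
      · exact ih (List.pairwise_cons.mp hp).2 l hl a ha

-- invariant of B's adjacent-dedup pass
theorem dedupB_inv (ys : List Int) : ∀ res : List Int, res.Pairwise (· < ·) →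
    ys.Pairwise (· ≤ ·) → (∀ b ∈ ys, ∀ a ∈ res, a ≤ b) →
    (ys.foldl (fun res item =>
        if res = [] ∨ PySem.List.pyGet? res (-1) ≠ some item then res ++ [item] else res) res).Pairwise (· < ·)
    ∧ (∀ x, x ∈ ys.foldl (fun res item =>
        if res = [] ∨ PySem.List.pyGet? res (-1) ≠ some item then res ++ [item] else res) res
        ↔ x ∈ res ∨ x ∈ ys) := by
  induction ys with
  | nil => intro res h1 _ _; exact ⟨h1, fun x => by simp⟩
  | cons y t ih =>
    intro res h1 h2 h3
    simp only [List.foldl_cons]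
    by_cases hc : res = [] ∨ PySem.List.pyGet? res (-1) ≠ some y
    · -- y is appended
      rw [if_pos hc]
      have hlt : ∀ a ∈ res, a < y := by
        intro a ha
        rcases hres : res with _ | ⟨r, rs⟩
        · subst hres; cases ha
        · subst hres
          cases hl : (r :: rs).getLast? with
          | none => rw [List.getLast?_eq_none_iff] at hl; cases hl
          | some l =>
            have hne : (r :: rs).getLast? ≠ some y := by
              rcases hc with hc | hc
              · cases hc
              · rwa [pyGet_neg_one] at hc
            have hal : a ≤ l := mem_le_getLast _ h1 l hl a ha
            have hlm : l ∈ r :: rs := lastMem _ _ hl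
            have hly : l ≤ y := h3 y (by simp) l hlm
            have hlny : l ≠ y := fun he => hne (by rw [hl, he])
            omega
      have h1' : (res ++ [y]).Pairwise (· < ·) := by
        rw [List.pairwise_append]
        refine ⟨h1, List.pairwise_singleton _ _, ?_⟩
        intro a ha b hb
        have : b = y := by simpa using hb
        subst this
        exact hlt a ha
      have h3' : ∀ b ∈ t, ∀ a ∈ res ++ [y], a ≤ b := by
        intro b hb a ha
        rcases List.mem_append.mp ha with ha | ha
        · exact h3 b (List.mem_cons_of_mem _ hb) a ha
        · have : a = y := by simpa using ha
          subst this
          exact (List.pairwise_cons.mp h2).1 b hb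
      obtain ⟨hpw2, hmem2⟩ := ih (res ++ [y]) h1' (List.pairwise_cons.mp h2).2 h3'
      refine ⟨hpw2, fun x => ?_⟩
      rw [hmem2 x]
      simp only [List.mem_append, List.mem_cons]
      tauto
    · -- y equals the last kept element: skipped
      rw [if_neg hc]
      rcases not_or.mp hc with ⟨hne, hy⟩
      have hy' : PySem.List.pyGet? res (-1) = some y := not_not.mp hy
      have hymem : y ∈ res := by
        rw [pyGet_neg_one] at hy'
        exact lastMem _ _ hy'
      have h3' : ∀ b ∈ t, ∀ a ∈ res, a ≤ b := fun b hb a ha =>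
        h3 b (List.mem_cons_of_mem _ hb) a ha
      obtain ⟨hpw2, hmem2⟩ := ih res h1 (List.pairwise_cons.mp h2).2 h3'
      refine ⟨hpw2, fun x => ?_⟩
      rw [hmem2 x]
      constructor
      · rintro (hx | hx)
        · exact Or.inl hx
        · exact Or.inr (List.mem_cons_of_mem _ hx)
      · rintro (hx | hx)
        · exact Or.inl hx
        · rcases List.mem_cons.mp hx with rfl | hx
          · exact Or.inl hymem
          · exact Or.inr hx

-- frozenset of a singleton list is that singleton
theorem ofList_single (x : Int) : PySem.Set.ofList ([x] : List Int) = [x] := rfl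

-- insertion into a singleton-mapped list mirrors insertion into the list itself
theorem insertBy_map (x : Int) (acc : List Int) :
    PySem.List.insertBy (fun a b => decide ((a : List Int) < b)) [x] (acc.map (fun a => ([a] : List Int)))
      = (PySem.List.insertBy (fun a b => decide (a < b)) x acc).map (fun a => ([a] : List Int)) := by
  induction acc with
  | nil => simp [PySem.List.insertBy]
  | cons y t ih =>
    have hd : (decide (([x] : List Int) < [y])) = decide (x < y) := decide_eq_decide.mpr (singleton_lt x y)
    simp only [List.map_cons, PySem.List.insertBy, hd]
    by_cases h : x < y
    · simp [h]
    · simp [h, ih]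

theorem foldl_insert_map (S : List Int) : ∀ acc : List Int,
    (S.map (fun a => ([a] : List Int))).foldl
        (fun acc x => PySem.List.insertBy (fun a b => decide (a < b)) x acc)
        (acc.map (fun a => ([a] : List Int)))
      = (S.foldl (fun acc x => PySem.List.insertBy (fun a b => decide (a < b)) x acc) acc).map
        (fun a => ([a] : List Int)) := by
  induction S with
  | nil => intro acc; rfl
  | cons z t ih =>
    intro acc
    simp only [List.map_cons, List.foldl_cons, insertBy_map]
    exact ih _

-- sorting singleton lists is sorting their elements
theorem sorted_map_single (S : List Int) :
    PySem.List.sorted (S.map (fun a => ([a] : List Int))) (fun x => x)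
      = (PySem.List.sorted S (fun x => x)).map (fun a => ([a] : List Int)) := by
  simp only [PySem.List.sorted_eq_foldl_insertBy]
  simpa using foldl_insert_map S []

-- A's value in closed form: the sorted distinct items, each wrapped as a singleton
theorem A_closed (ds : List (List Int)) :
    create_c1 ds = (PySem.List.sorted (PySem.Set.ofList (ds.flatMap (fun x => x))) (fun x => x)).map
      (fun x => ([x] : List Int)) := by
  show (PySem.List.sorted (ds.foldl (fun c1 line =>
      line.foldl (fun c1 item => if [item] ∈ c1 then c1 else c1 ++ [[item]]) c1) [])
      (fun x => x) false).map (fun x => PySem.Set.ofList x) = _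
  have hfold := outerA ds []
  simp only [List.map_nil] at hfold
  rw [hfold, updates_eq_ofList, sorted_map_single]
  simp only [List.map_map, Function.comp_def, ofList_single]

-- B's value in the same closed form
theorem B_closed (ds : List (List Int)) :
    create_c1_alt ds = (PySem.List.sorted (PySem.Set.ofList (ds.flatMap (fun x => x))) (fun x => x)).map
      (fun x => ([x] : List Int)) := by
  show ((PySem.List.sorted (ds.flatMap (fun line => line)) (fun x => x) false).foldl (fun res item =>
      if res = [] ∨ PySem.List.pyGet? res (-1) ≠ some item then res ++ [item] else res) []).map
      (fun item => PySem.Set.ofList [item]) = _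
  have hys2 : (PySem.List.sorted (ds.flatMap (fun line => line)) (fun x => x) false).Pairwise (· ≤ ·) := by
    simpa using PySem.List.sorted_pairwise (ds.flatMap (fun line => line)) (fun x => x)
  obtain ⟨hpw, hmem⟩ := dedupB_inv (PySem.List.sorted (ds.flatMap (fun line => line)) (fun x => x) false)
    [] List.Pairwise.nil hys2 (by intro b _ a ha; cases ha)
  have hnd : (((PySem.List.sorted (ds.flatMap (fun line => line)) (fun x => x) false).foldl (fun res item =>
      if res = [] ∨ PySem.List.pyGet? res (-1) ≠ some item then res ++ [item] else res) [])).Nodup :=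
    hpw.imp (fun h => ne_of_lt h)
  have hmem' : ∀ x, (x ∈ (PySem.List.sorted (ds.flatMap (fun line => line)) (fun x => x) false).foldl (fun res item =>
      if res = [] ∨ PySem.List.pyGet? res (-1) ≠ some item then res ++ [item] else res) [])
      ↔ x ∈ PySem.Set.ofList (ds.flatMap (fun x => x)) := by
    intro x
    rw [hmem x, PySem.Set.mem_ofList]
    simp [PySem.List.mem_sorted]
  have hperm : (((PySem.List.sorted (ds.flatMap (fun line => line)) (fun x => x) false).foldl (fun res item =>
      if res = [] ∨ PySem.List.pyGet? res (-1) ≠ some item then res ++ [item] else res) [])).Perm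
      (PySem.Set.ofList (ds.flatMap (fun x => x))) :=
    (List.perm_ext_iff_of_nodup hnd (PySem.Set.nodup_ofList _)).2 hmem'
  rw [PySem.List.sorted_eq_of_perm_of_pairwise_lt _ _ _ hperm (by simpa using hpw)]
  simp only [ofList_single]

-- ===== VERDICT (by name: the statement is the Claim_ definition above) =====
theorem create_c1_spec : Claim_equal_create_c1 := by
  intro ds _
  unfold Spec_create_c1
  rw [A_closed, B_closed]
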